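-- pv_equiv track=rewrite | github.com/pypi-data/pypi-mirror-283 | packages/pypoolparty/pypoolparty-0.3.1-py3-none-any.whl/pypoolparty/chunking.py | assign_tasks_to_chunks
-- ===== SOURCE A (Python) =====
-- import math
--
-- def assign_tasks_to_chunks(num_tasks, num_chunks):
--     """
--     When you have too many tasks for your parallel processing queue this
--     function chunks multiple tasks into fewer chunks.
--
--     Parameters
--     ----------
--     num_tasks : int
--         Number of tasks.
--     num_chunks : int (optional)
--         The maximum number of chunks. Your tasks will be spread over
--         these many chunks. If None, each chunk contains a single task.
--
--     Returns
--     -------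
--         A list of chunks where each chunk is a list of task-indices `itask`.
--         The lengths of the list of chunks is <= num_chunks.
--     """
--     if num_chunks is None:
--         num_tasks_in_chunk = 1
--     else:
--         assert num_chunks > 0
--         num_tasks_in_chunk = int(math.ceil(num_tasks / num_chunks))
--
--     chunks = []
--     current_chunk = []
--     for j in range(num_tasks):
--         if len(current_chunk) < num_tasks_in_chunk:
--             current_chunk.append(j)
--         else:
--             chunks.append(current_chunk)
--             current_chunk = []
--             current_chunk.append(j)
--     if len(current_chunk):
--         chunks.append(current_chunk)
--     return chunks
-- ===== SOURCE B (Python) =====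
-- import math
--
--
-- def assign_tasks_to_chunks(num_tasks, num_chunks):
--     """
--     Spread `num_tasks` task indices over consecutive chunks.
--
--     If num_chunks is None every chunk holds one task, otherwise the tasks
--     are packed into chunks of ceil(num_tasks / num_chunks) indices each.
--     """
--     if num_chunks is None:
--         size = 1
--     else:
--         assert num_chunks > 0
--         size = int(math.ceil(num_tasks / num_chunks))
--     if num_tasks <= 0:
--         return []
--     return [
--         list(range(start, min(start + size, num_tasks)))
--         for start in range(0, num_tasks, size)
--     ]
-- ===== Notes on version B (the rewrite author's own statement) =====
-- stated objective: simpler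
-- what changed: B iterates over chunk start offsets and builds each chunk directly as a range slice, replacing A's per-task accumulator loop with flush-on-full logic; Pre_ excludes num_chunks <= 0, on which A's assert raises AssertionError (B raises there too).
import Mathlib
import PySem

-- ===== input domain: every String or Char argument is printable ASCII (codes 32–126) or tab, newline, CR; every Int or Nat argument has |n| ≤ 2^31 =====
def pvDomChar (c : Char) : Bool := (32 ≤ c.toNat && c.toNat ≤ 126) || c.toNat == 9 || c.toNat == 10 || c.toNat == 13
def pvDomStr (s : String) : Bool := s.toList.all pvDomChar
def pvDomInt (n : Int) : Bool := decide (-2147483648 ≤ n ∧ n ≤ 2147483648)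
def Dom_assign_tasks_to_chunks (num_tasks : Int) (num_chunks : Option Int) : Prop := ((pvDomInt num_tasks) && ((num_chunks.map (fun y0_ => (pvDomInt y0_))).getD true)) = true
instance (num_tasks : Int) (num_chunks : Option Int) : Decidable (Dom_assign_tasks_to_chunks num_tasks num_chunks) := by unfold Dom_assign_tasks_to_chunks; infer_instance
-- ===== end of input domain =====

-- B iterates over chunk start offsets (one range slice per chunk) instead of A's
-- per-task accumulator loop; same return value on Pre_.

-- ===== PORT A =====
-- shared size computation (both Pythons have the identical lines):
-- int(math.ceil(num_tasks / num_chunks)) is exact ceiling division on Dom (|values| ≤ 2^31,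
-- far below the 2^52 double-precision threshold), ported as -((-a) // b).
def chunkSize (num_tasks : Int) (num_chunks : Option Int) : Int :=
  match num_chunks with
  | none => 1
  | some nc => -(PySem.Int.floordiv (-num_tasks) nc)

def assign_tasks_to_chunks (num_tasks : Int) (num_chunks : Option Int) : List (List Int) :=
  let num_tasks_in_chunk := chunkSize num_tasks num_chunks
  let st := (PySem.List.pyRange 0 num_tasks 1).foldl
    (fun (st : List (List Int) × List Int) j =>
      if (st.2.length : Int) < num_tasks_in_chunk then (st.1, st.2 ++ [j])
      else (st.1 ++ [st.2], [j])) ([], [])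
  if st.2.length ≠ 0 then st.1 ++ [st.2] else st.1

-- ===== PORT B =====
def assign_tasks_to_chunks_alt (num_tasks : Int) (num_chunks : Option Int) : List (List Int) :=
  let size := chunkSize num_tasks num_chunks
  if num_tasks ≤ 0 then []
  else (PySem.List.pyRange 0 num_tasks size).map
    (fun start => PySem.List.pyRange start (min (start + size) num_tasks) 1)

-- ===== PRECONDITION & SPEC =====
-- Pre_ excludes num_chunks ≤ 0, on which A's `assert num_chunks > 0` raises AssertionError.
def Pre_assign_tasks_to_chunks (num_tasks : Int) (num_chunks : Option Int) : Prop :=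
  0 < num_chunks.getD 1
instance (num_tasks : Int) (num_chunks : Option Int) : Decidable (Pre_assign_tasks_to_chunks num_tasks num_chunks) := by unfold Pre_assign_tasks_to_chunks; infer_instance

def pvWitness_assign_tasks_to_chunks : Int × Option Int := (5, some 2)

def Spec_assign_tasks_to_chunks (num_tasks : Int) (num_chunks : Option Int) (out : List (List Int)) : Prop := out = assign_tasks_to_chunks_alt num_tasks num_chunks
instance (num_tasks : Int) (num_chunks : Option Int) (out : List (List Int)) : Decidable (Spec_assign_tasks_to_chunks num_tasks num_chunks out) := by unfold Spec_assign_tasks_to_chunks; infer_instance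

-- ===== CLAIM =====
def Claim_equal_assign_tasks_to_chunks : Prop := ∀ (num_tasks : Int) (num_chunks : Option Int), Dom_assign_tasks_to_chunks num_tasks num_chunks → Pre_assign_tasks_to_chunks num_tasks num_chunks → Spec_assign_tasks_to_chunks num_tasks num_chunks (assign_tasks_to_chunks num_tasks num_chunks)

-- ===== LEMMAS AND PROOFS =====

-- A's loop step with chunk capacity s+1, and its finalization
def pvStep (s : Nat) (st : List (List Int) × List Int) (j : Int) : List (List Int) × List Int :=
  if st.2.length < s + 1 then (st.1, st.2 ++ [j]) else (st.1 ++ [st.2], [j])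

def pvFin (st : List (List Int) × List Int) : List (List Int) :=
  if st.2.length ≠ 0 then st.1 ++ [st.2] else st.1

-- reference chunking: consecutive blocks of s+1 elements
def chunksOfAux (s : Nat) : List Int → List (List Int)
  | [] => []
  | x :: rest => ((x :: rest).take (s + 1)) :: chunksOfAux s ((x :: rest).drop (s + 1))
  termination_by l => l.length
  decreasing_by simp

lemma chunksOfAux_nil (s : Nat) : chunksOfAux s [] = [] := by
  rw [chunksOfAux]

lemma chunksOfAux_cons (s : Nat) (x : Int) (rest : List Int) :
    chunksOfAux s (x :: rest)
      = ((x :: rest).take (s + 1)) :: chunksOfAux s ((x :: rest).drop (s + 1)) := by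
  rw [chunksOfAux]

lemma pvStep_eq (s : Nat) :
    (fun (st : List (List Int) × List Int) (j : Int) =>
      if (st.2.length : Int) < (s : Int) + 1 then (st.1, st.2 ++ [j])
      else (st.1 ++ [st.2], [j])) = pvStep s := by
  funext st j
  unfold pvStep
  simp only [show ((st.2.length : Int) < (s : Int) + 1) ↔ st.2.length < s + 1 by omega]

lemma foldl_pad (s : Nat) (cur : List Int) : ∀ (xs : List Int) (acc : List (List Int)) (curp : List Int),
    curp.length + cur.length ≤ s + 1 →
    List.foldl (pvStep s) (acc, curp) (cur ++ xs) = List.foldl (pvStep s) (acc, curp ++ cur) xs := by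
  induction cur with
  | nil => intro xs acc curp _; simp
  | cons c cur ih =>
    intro xs acc curp h
    have hc : curp.length < s + 1 := by simp at h; omega
    simp only [List.cons_append, List.foldl_cons, pvStep, if_pos hc]
    rw [ih xs acc (curp ++ [c]) (by simp at h ⊢; omega)]
    simp

lemma foldA (s : Nat) : ∀ (m : Nat) (xs : List Int), xs.length ≤ m → ∀ (acc : List (List Int)),
    pvFin (xs.foldl (pvStep s) (acc, [])) = acc ++ chunksOfAux s xs := by
  intro m
  induction m with
  | zero =>
    intro xs hx acc
    rw [List.length_eq_zero_iff.mp (Nat.le_zero.mp hx)]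
    simp [pvFin, chunksOfAux_nil]
  | succ m ih =>
    intro xs hx acc
    cases xs with
    | nil => simp [pvFin, chunksOfAux_nil]
    | cons x rest =>
      by_cases hlen : (x :: rest).length ≤ s + 1
      · have hp := foldl_pad s (x :: rest) [] acc [] (by simpa using hlen)
        simp only [List.append_nil, List.nil_append, List.foldl_nil] at hp
        rw [hp, chunksOfAux_cons]
        rw [List.take_of_length_le hlen, List.drop_eq_nil_of_le hlen]
        simp [pvFin, chunksOfAux_nil]
      · replace hlen : s + 1 < (x :: rest).length := by omega
        have h1 : ((x :: rest).take (s + 1)).length = s + 1 := by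
          rw [List.length_take]; omega
        conv_lhs => rw [← List.take_append_drop (s + 1) (x :: rest)]
        rw [List.foldl_append]
        have hp := foldl_pad s ((x :: rest).take (s + 1)) [] acc [] (by simp)
        simp only [List.append_nil, List.nil_append, List.foldl_nil] at hp
        rw [hp]
        obtain ⟨y, rest2, hd⟩ : ∃ y rest2, (x :: rest).drop (s + 1) = y :: rest2 := by
          cases hdd : (x :: rest).drop (s + 1) with
          | nil =>
            exfalso
            have h2 := congrArg List.length hdd
            rw [List.length_drop] at h2
            simp only [List.length_cons, List.length_nil] at h2 hlen
            omega
          | cons y r => exact ⟨y, r, rfl⟩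
        rw [hd, List.foldl_cons]
        have hstep : pvStep s (acc, (x :: rest).take (s + 1)) y
            = (acc ++ [(x :: rest).take (s + 1)], [y]) := by
          unfold pvStep
          rw [if_neg (by rw [h1]; omega)]
        rw [hstep]
        have hpad2 := foldl_pad s [y] rest2 (acc ++ [(x :: rest).take (s + 1)]) [] (by simp)
        simp only [List.nil_append, List.singleton_append] at hpad2
        rw [← hpad2, ← hd,
          ih ((x :: rest).drop (s + 1))
            (by rw [List.length_drop]; simp only [List.length_cons] at hx ⊢; omega)
            (acc ++ [(x :: rest).take (s + 1)])]
        conv_rhs => rw [chunksOfAux_cons]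
        simp

lemma pyRange_pos_nil {a b s : Int} (hs : 0 < s) (hab : b ≤ a) :
    PySem.List.pyRange a b s = [] := by
  rw [PySem.List.pyRange_of_pos _ _ hs]
  simp [show ¬ a < b by omega]

lemma pyRange_pos_cons {a b s : Int} (hs : 0 < s) (hab : a < b) :
    PySem.List.pyRange a b s = a :: PySem.List.pyRange (a + s) b s := by
  rw [PySem.List.pyRange_of_pos _ _ hs, PySem.List.pyRange_of_pos _ _ hs]
  by_cases h2 : a + s < b
  · have hq : (b - a + s - 1) / s = (b - (a + s) + s - 1) / s + 1 := by
      have he : b - a + s - 1 = (b - (a + s) + s - 1) + 1 * s := by ring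
      rw [he, Int.add_mul_ediv_right _ _ (by omega)]
    have hnn : 0 ≤ (b - (a + s) + s - 1) / s := Int.ediv_nonneg (by omega) (by omega)
    rw [if_pos hab, if_pos h2, hq,
      show ((b - (a + s) + s - 1) / s + 1).toNat = ((b - (a + s) + s - 1) / s).toNat + 1 by omega,
      List.range_succ_eq_map]
    simp only [List.map_cons, List.map_map]
    congr 1
    · simp
    · refine List.map_congr_left ?_
      intro k _
      simp only [Function.comp_apply]
      push_cast
      ring
  · have hq : (b - a + s - 1) / s = 1 := by
      have he : b - a + s - 1 = (b - a - 1) + 1 * s := by ring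
      rw [he, Int.add_mul_ediv_right _ _ (by omega),
        Int.ediv_eq_zero_of_lt (by omega) (by omega)]
      norm_num
    rw [if_pos hab, if_neg (by omega), hq]
    simp

lemma take_pyRange_one {a b : Int} (s : Nat) (hab : a < b) :
    (PySem.List.pyRange a b 1).take (s + 1)
      = PySem.List.pyRange a (min (a + ((s : Int) + 1)) b) 1 := by
  have h1 : a ≤ min (a + ((s : Int) + 1)) b := by omega
  rw [PySem.List.pyRange_one_append a (min (a + ((s : Int) + 1)) b) b h1 (min_le_right _ _)]
  by_cases h2 : a + ((s : Int) + 1) ≤ b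
  · have hlen : (PySem.List.pyRange a (min (a + ((s : Int) + 1)) b) 1).length = s + 1 := by
      rw [PySem.List.length_pyRange_one]; omega
    rw [List.take_left' hlen]
  · rw [PySem.List.pyRange_one_eq_nil (show b ≤ min (a + ((s : Int) + 1)) b by omega),
      List.append_nil,
      List.take_of_length_le (by rw [PySem.List.length_pyRange_one]; omega)]

lemma drop_pyRange_one {a b : Int} (s : Nat) (hab : a < b) :
    (PySem.List.pyRange a b 1).drop (s + 1)
      = PySem.List.pyRange (a + ((s : Int) + 1)) b 1 := by
  by_cases h2 : a + ((s : Int) + 1) ≤ b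
  · rw [PySem.List.pyRange_one_append a (a + ((s : Int) + 1)) b (by omega) h2]
    have hlen : (PySem.List.pyRange a (a + ((s : Int) + 1)) 1).length = s + 1 := by
      rw [PySem.List.length_pyRange_one]; omega
    rw [List.drop_left' hlen]
  · rw [List.drop_eq_nil_of_le (by rw [PySem.List.length_pyRange_one]; omega),
      PySem.List.pyRange_one_eq_nil (by omega)]

lemma B_eq (s : Nat) : ∀ (m : Nat) (a b : Int), (b - a).toNat ≤ m →
    (PySem.List.pyRange a b ((s : Int) + 1)).map
      (fun start => PySem.List.pyRange start (min (start + ((s : Int) + 1)) b) 1)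
      = chunksOfAux s (PySem.List.pyRange a b 1) := by
  intro m
  induction m with
  | zero =>
    intro a b h
    have hab : b ≤ a := by omega
    rw [pyRange_pos_nil (by omega) hab, PySem.List.pyRange_one_eq_nil hab]
    simp [chunksOfAux_nil]
  | succ m ih =>
    intro a b h
    by_cases hab : a < b
    · rw [pyRange_pos_cons (by omega) hab, List.map_cons]
      have hcons : PySem.List.pyRange a b 1 = a :: PySem.List.pyRange (a + 1) b 1 :=
        PySem.List.pyRange_one_cons hab
      rw [hcons, chunksOfAux_cons, ← hcons,
        take_pyRange_one s hab, drop_pyRange_one s hab,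
        ih (a + ((s : Int) + 1)) b (by omega)]
    · rw [pyRange_pos_nil (by omega) (by omega), PySem.List.pyRange_one_eq_nil (by omega)]
      simp [chunksOfAux]

lemma size_pos {n k : Int} (hn : 0 < n) (hk : 0 < k) :
    0 < -(PySem.Int.floordiv (-n) k) := by
  rcases (PySem.Int.neg_floordiv_neg_eq_iff_of_pos
      (a := n) (q := -(PySem.Int.floordiv (-n) k)) hk).mp rfl with ⟨h1, h2⟩
  nlinarith

-- ===== VERDICT =====
theorem assign_tasks_to_chunks_spec : Claim_equal_assign_tasks_to_chunks := by
  intro n c _ hpre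
  unfold Spec_assign_tasks_to_chunks assign_tasks_to_chunks assign_tasks_to_chunks_alt
  by_cases hn : n ≤ 0
  · simp only [if_pos hn, PySem.List.pyRange_one_eq_nil hn, List.foldl_nil]
    simp
  · replace hn : 0 < n := by omega
    simp only [if_neg hn.not_ge]
    have hsize : 0 < chunkSize n c := by
      unfold chunkSize
      cases c with
      | none => norm_num
      | some k => exact size_pos hn (by simpa [Pre_assign_tasks_to_chunks] using hpre)
    obtain ⟨s, hs⟩ : ∃ s : Nat, chunkSize n c = (s : Int) + 1 :=
      ⟨(chunkSize n c - 1).toNat, by omega⟩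
    rw [hs, pvStep_eq s, B_eq s (n - 0).toNat 0 n le_rfl]
    simpa [pvFin] using
      foldA s (PySem.List.pyRange 0 n 1).length (PySem.List.pyRange 0 n 1) le_rfl []
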